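-- pv_equiv track=rewrite | github.com/elitm/hackathon | Utils.py | divide_to_domains
-- ===== SOURCE A (Python) =====
-- ALPHABET_SIZE = 26
--
-- def divide_to_domains(original_len, num_of_servers):
--     """
--     divide tasks to n servers fairly
--     :raise TypeError if len or servers are not integers
--     :param original_len: length of strings in search ranges
--     :param num_of_servers: amount of servers requiring for task
--     :return: return list of tasks: [(start1,end1), (start2,end2),...,(startn,endn)]
--        where n is the amount of servers available to work
--     """
--     if int(original_len) != original_len:
--         raise TypeError("length of string must be integer")
--     if int(num_of_servers) != num_of_servers:
--         raise TypeError("amount of server must be integer")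
--
--     domains = [None] * num_of_servers
--     domains_str = [None] * num_of_servers
--     last = 'z' * original_len
--
--     count_permutations = __get_count_permutations(original_len)
--     per_server = count_permutations // num_of_servers
--     str_as_int = 0
--
--     for i in range(len(domains)):
--         start = __get_string_value(str_as_int, original_len)
--
--         if str_as_int >= count_permutations:
--             start = last
--         str_as_int += per_server
--         end = __get_string_value(str_as_int, original_len)
--
--         if str_as_int >= count_permutations:
--             end = last
--         domains[i] = (start, end)
--         domains_str[i] = start + end
--         str_as_int += 1
--     domains[len(domains) - 1] = (domains[len(domains) - 1][0], last)
--
--     return domains_str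
--
-- def __get_count_permutations(strLen):
--     """
--     :param strLen: length of required strings
--     :return: amount of different strings could be generated in given length
--     """
--     return ALPHABET_SIZE ** strLen
--
-- def __get_string_value(to_convert, length):
--     """
--     translate int to string with given len
--      when 0 is 'aaa...a'
--     :param to_convert: integer value of string
--     :param length: required string length
--     :return: string value of given number with given length
--     """
--     str_val = ""
--     while to_convert > 0:
--         c = int(to_convert % 26)
--         str_val = chr(c + 97) + str_val
--         to_convert = int(to_convert // 26)
--         length = length - 1
--     while length > 0:
--         str_val = 'a' + str_val
--         length -= 1
--     return str_val
-- ===== SOURCE B (Python) =====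
-- ALPHABET_SIZE = 26
--
--
-- def divide_to_domains(original_len, num_of_servers):
--     """
--     divide tasks to n servers fairly; digit-vector variant: endpoints are kept
--     as base-26 digit vectors (least-significant first) and advanced by
--     carry-propagating vector addition, with a saturation flag instead of
--     comparing big integers; no per-endpoint int-to-string conversion.
--     """
--     if int(original_len) != original_len:
--         raise TypeError("length of string must be integer")
--     if int(num_of_servers) != num_of_servers:
--         raise TypeError("amount of server must be integer")
--
--     count = ALPHABET_SIZE ** original_len
--     per = count // num_of_servers
--     last = 'z' * original_len
--
--     def digits(x):
--         """low `original_len` base-26 digits (LSB first) and the high part."""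
--         return [x // ALPHABET_SIZE ** j % ALPHABET_SIZE
--                 for j in range(original_len)], x // count
--
--     def add(xs, ys):
--         """carry-propagating addition of two digit vectors."""
--         out, carry = [], 0
--         for a, b in zip(xs, ys):
--             s = a + b + carry
--             out.append(s % ALPHABET_SIZE)
--             carry = s // ALPHABET_SIZE
--         return out, carry
--
--     def render(xs):
--         return ''.join(chr(97 + d) for d in reversed(xs))
--
--     per_d, per_hi = digits(per)
--     step_d, step_hi = digits(per + 1)
--
--     res = []
--     cur = [0] * original_len
--     cur_over = False
--     for _ in range(num_of_servers):
--         start = last if cur_over else render(cur)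
--         end_d, c = add(cur, per_d)
--         end_over = cur_over or per_hi > 0 or c > 0
--         end = last if end_over else render(end_d)
--         res.append(start + end)
--         cur, c2 = add(cur, step_d)
--         cur_over = cur_over or step_hi > 0 or c2 > 0
--     return res
-- ===== Notes on version B (the rewrite author's own statement) =====
-- stated objective: alternative
-- what changed: B abandons big-integer endpoint arithmetic entirely: it keeps the current endpoint as a base-26 digit vector (LSB first), advances it by carry-propagating vector addition of precomputed per-server/step digit vectors, and tracks overflow past 26**len with a saturation flag instead of comparing big integers; A accumulates a big integer and converts each endpoint with repeated big-int divmod, O(len^2) per endpoint vs B's O(len) vector add.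
-- outside the precondition, e.g. on divide_to_domains(-1, 1): A returns [''], B returns ['']; on divide_to_domains(-494, 8): A returns ['', '', '', '', '', '', '', ''], B raises ZeroDivisionError
import Mathlib
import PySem

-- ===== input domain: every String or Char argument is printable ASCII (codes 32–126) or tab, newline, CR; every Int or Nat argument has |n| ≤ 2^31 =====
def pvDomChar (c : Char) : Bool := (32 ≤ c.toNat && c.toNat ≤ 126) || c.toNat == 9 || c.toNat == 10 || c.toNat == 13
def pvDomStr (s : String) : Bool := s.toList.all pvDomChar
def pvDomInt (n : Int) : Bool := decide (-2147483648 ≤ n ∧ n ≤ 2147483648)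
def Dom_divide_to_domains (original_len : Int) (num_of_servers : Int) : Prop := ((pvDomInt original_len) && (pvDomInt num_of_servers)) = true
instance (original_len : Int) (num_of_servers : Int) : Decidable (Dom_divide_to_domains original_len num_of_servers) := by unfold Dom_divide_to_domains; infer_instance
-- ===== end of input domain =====

-- B keeps the current endpoint as a base-26 digit vector advanced by carry-propagating
-- vector addition with a saturation flag, instead of A's big-integer accumulator with a
-- per-endpoint int-to-string conversion (objective: alternative algorithm, same results).

-- ===== PORT A =====

-- __get_string_value, second while loop: pad with 'a' up to `length`
def pvGsvPad (length : Int) (str_val : List Char) : List Char :=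
  if _h : length > 0 then pvGsvPad (length - 1) ('a' :: str_val) else str_val
termination_by length.toNat
decreasing_by omega

-- __get_string_value, first while loop (chr(c + 97) is exact: codes 97..122)
def pvGsvLoop (to_convert : Int) (length : Int) (str_val : List Char) : List Char :=
  if _h : to_convert > 0 then
    pvGsvLoop (PySem.Int.floordiv to_convert 26) (length - 1)
      (Char.ofNat ((PySem.Int.mod to_convert 26) + 97).toNat :: str_val)
  else pvGsvPad length str_val
termination_by to_convert.toNat
decreasing_by
  rw [PySem.Int.floordiv_eq_ediv_of_pos (by omega : (0:Int) < 26)]; omega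

-- body of A's for-loop; the state is (domains, domains_str, str_as_int)
def pvStepA (count per : Int) (last : List Char) (original_len : Int)
    (st : List (String × String) × List String × Int) (_i : Nat) :
    List (String × String) × List String × Int :=
  let domains := st.1
  let domains_str := st.2.1
  let str_as_int := st.2.2
  let start := pvGsvLoop str_as_int original_len []
  let start := if str_as_int ≥ count then last else start
  let str_as_int := str_as_int + per
  let e := pvGsvLoop str_as_int original_len []
  let e := if str_as_int ≥ count then last else e
  (domains ++ [(String.mk start, String.mk e)],
   domains_str ++ [String.mk (start ++ e)],
   str_as_int + 1)

def divide_to_domains (original_len : Int) (num_of_servers : Int) : List String :=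
  -- the two int(x) != x TypeError guards never fire: both arguments are integers here
  let last := List.replicate original_len.toNat 'z'   -- 'z' * original_len ('' when negative)
  -- 26 ** original_len; exact for original_len ≥ 0 (Pre_: Python yields a float on a negative exponent)
  let count_permutations : Int := 26 ^ original_len.toNat
  -- '//': ZeroDivisionError for num_of_servers = 0 is excluded by Pre_
  let per_server := PySem.Int.floordiv count_permutations num_of_servers
  let st := (List.range num_of_servers.toNat).foldl
      (pvStepA count_permutations per_server last original_len) ([], [], 0)
  let domains := st.1
  let domains_str := st.2.1
  -- domains[len(domains)-1] = (domains[len(domains)-1][0], last): mutates `domains`, which is not returned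
  let _domains := PySem.List.pySetD domains ((domains.length : Int) - 1)
      ((PySem.List.pyGetD domains ((domains.length : Int) - 1) ("", "")).1, String.mk last)
  domains_str

-- ===== PORT B =====

-- digits(x): low `original_len` base-26 digits, least-significant first (the high part
-- x // count is taken separately at the call sites)
def pvDigitsLow (original_len : Int) (x : Int) : List Int :=
  (List.range original_len.toNat).map
    (fun j => PySem.Int.mod (PySem.Int.floordiv x ((26 : Int) ^ j)) 26)

-- body of add's for-loop over zip(xs, ys); state is (out, carry)
def pvAddStep (st : List Int × Int) (p : Int × Int) : List Int × Int :=
  (st.1 ++ [PySem.Int.mod (p.1 + p.2 + st.2) 26],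
   PySem.Int.floordiv (p.1 + p.2 + st.2) 26)

-- add(xs, ys): carry-propagating addition of two digit vectors
def pvAdd (xs ys : List Int) : List Int × Int :=
  (List.zip xs ys).foldl pvAddStep ([], 0)

-- render(xs): ''.join(chr(97 + d) for d in reversed(xs)), as a char list
def pvRender (xs : List Int) : List Char :=
  xs.reverse.map (fun d => Char.ofNat (97 + d).toNat)

-- body of B's for-loop; the state is (res, cur, cur_over)
def pvStepB (per_d step_d : List Int) (per_hi step_hi : Int) (last : List Char)
    (st : List String × List Int × Bool) (_i : Nat) : List String × List Int × Bool :=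
  let res := st.1
  let cur := st.2.1
  let cur_over := st.2.2
  let start := if cur_over then last else pvRender cur
  let ec := pvAdd cur per_d
  let end_over := cur_over || decide (per_hi > 0) || decide (ec.2 > 0)
  let e := if end_over then last else pvRender ec.1
  let cc := pvAdd cur step_d
  (res ++ [String.mk (start ++ e)], cc.1,
   cur_over || decide (step_hi > 0) || decide (cc.2 > 0))

def divide_to_domains_alt (original_len : Int) (num_of_servers : Int) : List String :=
  let count : Int := 26 ^ original_len.toNat
  let per := PySem.Int.floordiv count num_of_servers
  let last := List.replicate original_len.toNat 'z'
  let per_d := pvDigitsLow original_len per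
  let per_hi := PySem.Int.floordiv per count
  let step_d := pvDigitsLow original_len (per + 1)
  let step_hi := PySem.Int.floordiv (per + 1) count
  ((List.range num_of_servers.toNat).foldl
      (pvStepB per_d step_d per_hi step_hi last)
      ([], List.replicate original_len.toNat 0, false)).1

-- ===== PRECONDITION & SPEC =====
-- Pre_ excludes num_of_servers ≤ 0 (A raises ZeroDivisionError / IndexError) and negative
-- original_len, where A's arithmetic goes through Python floats (26 ** negative), which the
-- Int port cannot represent (see claim cites).
def Pre_divide_to_domains (original_len : Int) (num_of_servers : Int) : Prop :=
  0 ≤ original_len ∧ 1 ≤ num_of_servers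
instance (original_len : Int) (num_of_servers : Int) : Decidable (Pre_divide_to_domains original_len num_of_servers) := by unfold Pre_divide_to_domains; infer_instance

def pvWitness_divide_to_domains : Int × Int := (2, 3)

def Spec_divide_to_domains (original_len : Int) (num_of_servers : Int) (out : List String) : Prop := out = divide_to_domains_alt original_len num_of_servers
instance (original_len : Int) (num_of_servers : Int) (out : List String) : Decidable (Spec_divide_to_domains original_len num_of_servers out) := by unfold Spec_divide_to_domains; infer_instance

-- ===== CLAIM (what is proved, stated in full; the proofs are below) =====
def Claim_equal_divide_to_domains : Prop := ∀ (original_len : Int) (num_of_servers : Int), Dom_divide_to_domains original_len num_of_servers → Pre_divide_to_domains original_len num_of_servers → Spec_divide_to_domains original_len num_of_servers (divide_to_domains original_len num_of_servers)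

-- ===== LEMMAS AND PROOFS =====

-- canonical base-26 rendering of m in L digits, 'a' = 0 (most-significant first)
def pvCanon (m L : Nat) : List Char :=
  (List.range L).map (fun j => Char.ofNat (97 + m / 26 ^ (L - 1 - j) % 26))

-- the low L base-26 digits of m, least-significant first, as Ints
def pvDigN (m L : Nat) : List Int :=
  (List.range L).map (fun j => ((m / 26 ^ j % 26 : Nat) : Int))

lemma pvGsvPad_eq (L : Nat) (acc : List Char) :
    pvGsvPad (L : Int) acc = List.replicate L 'a' ++ acc := by
  induction L generalizing acc with
  | zero => simp [pvGsvPad]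
  | succ k ih =>
      rw [pvGsvPad]
      have h1 : ((k + 1 : Nat) : Int) - 1 = (k : Int) := by push_cast; ring
      simp only [show ((k + 1 : Nat) : Int) > 0 by exact_mod_cast Nat.succ_pos k, dif_pos, h1]
      rw [ih, List.replicate_succ']
      simp

lemma pvCanon_zero (L : Nat) : pvCanon 0 L = List.replicate L 'a' := by
  have : pvCanon 0 L = (List.range L).map (fun _ => 'a') := by
    unfold pvCanon
    exact List.map_congr_left (fun j _ => by norm_num)
  rw [this, List.map_const', List.length_range]

lemma pvCanon_succ (m L : Nat) :
    pvCanon m (L + 1) = pvCanon (m / 26) L ++ [Char.ofNat (97 + m % 26)] := by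
  unfold pvCanon
  rw [List.range_succ, List.map_append]
  congr 1
  · refine List.map_congr_left (fun j hj => ?_)
    have hjL : j < L := List.mem_range.mp hj
    have h1 : L + 1 - 1 - j = (L - 1 - j) + 1 := by omega
    rw [h1, pow_succ, ← Nat.div_div_eq_div_mul, Nat.div_div_eq_div_mul, Nat.mul_comm,
        ← Nat.div_div_eq_div_mul]
  · simp

lemma pvGsvLoop_eq (L : Nat) : ∀ (m : Nat) (acc : List Char), m < 26 ^ L →
    pvGsvLoop (m : Int) (L : Int) acc = pvCanon m L ++ acc := by
  induction L with
  | zero =>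
      intro m acc hm
      have : m = 0 := by simpa using hm
      subst this
      rw [pvGsvLoop]
      simp [pvCanon, pvGsvPad]
  | succ k ih =>
      intro m acc hm
      rcases Nat.eq_zero_or_pos m with h0 | hpos
      · subst h0
        rw [pvGsvLoop, dif_neg (by norm_num : ¬ (((0:Nat) : Int) > 0)), pvGsvPad_eq,
          pvCanon_zero]
      · rw [pvGsvLoop]
        have hgt : ((m : Nat) : Int) > 0 := by exact_mod_cast hpos
        simp only [hgt, dif_pos]
        have hdiv : PySem.Int.floordiv (m : Int) 26 = ((m / 26 : Nat) : Int) := by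
          exact_mod_cast PySem.Int.floordiv_natCast m 26
        have hmod : PySem.Int.mod (m : Int) 26 = ((m % 26 : Nat) : Int) := by
          exact_mod_cast PySem.Int.mod_natCast m 26
        have hlen : ((k + 1 : Nat) : Int) - 1 = (k : Int) := by push_cast; ring
        rw [hdiv, hmod, hlen]
        have htn : (((m % 26 : Nat) : Int) + 97).toNat = 97 + m % 26 := by omega
        rw [htn]
        have hlt : m / 26 < 26 ^ k := by
          have : (26 : Nat) ^ (k + 1) = 26 ^ k * 26 := pow_succ 26 k
          exact Nat.div_lt_of_lt_mul (by omega)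
        rw [ih (m / 26) _ hlt, pvCanon_succ]
        simp

-- start/end of the i-th range, as A computes them from the running value s
def pvSA (count per : Int) (last : List Char) (l : Int) (s : Int) : List Char :=
  if s ≥ count then last else pvGsvLoop s l []
def pvEA (count per : Int) (last : List Char) (l : Int) (s : Int) : List Char :=
  if s + per ≥ count then last else pvGsvLoop (s + per) l []

lemma pvLoopA (count per l : Int) (last : List Char) :
    ∀ (k : Nat) (d0 : List (String × String)) (ds0 : List String) (s0 : Int),
    (List.range k).foldl (pvStepA count per last l) (d0, ds0, s0)
    = (d0 ++ (List.range k).map (fun (i : Nat) =>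
          (String.mk (pvSA count per last l (s0 + (i : Int) * (per + 1))),
           String.mk (pvEA count per last l (s0 + (i : Int) * (per + 1))))),
       ds0 ++ (List.range k).map (fun (i : Nat) =>
          String.mk (pvSA count per last l (s0 + (i : Int) * (per + 1))
                     ++ pvEA count per last l (s0 + (i : Int) * (per + 1)))),
       s0 + (k : Int) * (per + 1)) := by
  intro k
  induction k with
  | zero => intro d0 ds0 s0; simp
  | succ k ih =>
      intro d0 ds0 s0
      rw [List.range_succ, List.foldl_append, ih]
      simp only [List.foldl_cons, List.foldl_nil, pvStepA, pvSA, pvEA]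
      rw [Prod.mk.injEq, Prod.mk.injEq]
      refine ⟨?_, ?_, by push_cast; ring⟩ <;> simp

-- ---- B-side lemmas ----

lemma pvDigN_cons (v L : Nat) :
    pvDigN v (L + 1) = ((v % 26 : Nat) : Int) :: pvDigN (v / 26) L := by
  unfold pvDigN
  rw [List.range_succ_eq_map, List.map_cons, List.map_map]
  refine congrArg₂ _ (by norm_num) (List.map_congr_left (fun j _ => ?_))
  simp [Function.comp, pow_succ', ← Nat.div_div_eq_div_mul]

lemma pvDigN_mod (v L : Nat) : pvDigN v L = pvDigN (v % 26 ^ L) L := by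
  unfold pvDigN
  refine List.map_congr_left (fun j hj => ?_)
  have hjL : j < L := List.mem_range.mp hj
  have hd : (26 : Nat) ^ j * 26 ∣ 26 ^ L := by
    rw [← pow_succ]; exact pow_dvd_pow 26 (by omega)
  refine congrArg (fun n : Nat => (n : Int)) ?_
  rw [← Nat.mod_mul_right_div_self v (26 ^ j) 26,
      ← Nat.mod_mul_right_div_self (v % 26 ^ L) (26 ^ j) 26,
      Nat.mod_mod_of_dvd v hd]

lemma pvDigN_zero (L : Nat) : pvDigN 0 L = List.replicate L 0 := by
  have : pvDigN 0 L = (List.range L).map (fun _ => (0 : Int)) := by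
    unfold pvDigN
    exact List.map_congr_left (fun j _ => by norm_num)
  rw [this, List.map_const', List.length_range]

-- the add loop computes digit-vector addition exactly
lemma pvAddFold (L : Nat) : ∀ (a b c : Nat) (out : List Int), c ≤ 1 → a < 26 ^ L → b < 26 ^ L →
    (List.zip (pvDigN a L) (pvDigN b L)).foldl pvAddStep (out, (c : Int))
      = (out ++ pvDigN ((a + b + c) % 26 ^ L) L, (((a + b + c) / 26 ^ L : Nat) : Int)) := by
  induction L with
  | zero =>
      intro a b c out _ ha hb
      have ha0 : a = 0 := by simpa using ha
      have hb0 : b = 0 := by simpa using hb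
      subst ha0; subst hb0
      simp [pvDigN]
  | succ k ih =>
      intro a b c out hc ha hb
      rw [pvDigN_cons a, pvDigN_cons b, List.zip_cons_cons, List.foldl_cons]
      have hstep : pvAddStep (out, (c : Int)) (((a % 26 : Nat) : Int), ((b % 26 : Nat) : Int))
          = (out ++ [(((a % 26 + b % 26 + c) % 26 : Nat) : Int)],
             (((a % 26 + b % 26 + c) / 26 : Nat) : Int)) := by
        unfold pvAddStep
        have hs : ((a % 26 : Nat) : Int) + ((b % 26 : Nat) : Int) + (c : Int)
            = ((a % 26 + b % 26 + c : Nat) : Int) := by push_cast; ring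
        rw [hs]
        rw [show ((26:Int)) = ((26 : Nat) : Int) from rfl,
            PySem.Int.mod_natCast, PySem.Int.floordiv_natCast]
      rw [hstep]
      have hc' : (a % 26 + b % 26 + c) / 26 ≤ 1 := by omega
      have ha' : a / 26 < 26 ^ k := by
        have : (26 : Nat) ^ (k + 1) = 26 ^ k * 26 := pow_succ 26 k
        exact Nat.div_lt_of_lt_mul (by omega)
      have hb' : b / 26 < 26 ^ k := by
        have : (26 : Nat) ^ (k + 1) = 26 ^ k * 26 := pow_succ 26 k
        exact Nat.div_lt_of_lt_mul (by omega)
      rw [ih (a / 26) (b / 26) ((a % 26 + b % 26 + c) / 26) _ hc' ha' hb']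
      set T := a + b + c with hT
      have hdivs : a / 26 + b / 26 + (a % 26 + b % 26 + c) / 26 = T / 26 := by omega
      rw [hdivs]
      have hmodT : (a % 26 + b % 26 + c) % 26 = T % 26 := by omega
      have hcarry : T / 26 / 26 ^ k = T / 26 ^ (k + 1) := by
        rw [Nat.div_div_eq_div_mul, ← pow_succ']
      have hdig : pvDigN (T % 26 ^ (k + 1)) (k + 1)
          = ((T % 26 : Nat) : Int) :: pvDigN (T / 26 % 26 ^ k) k := by
        rw [pvDigN_cons]
        have h1 : T % 26 ^ (k + 1) % 26 = T % 26 := by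
          exact Nat.mod_mod_of_dvd T (dvd_pow_self 26 (Nat.succ_ne_zero k))
        have h2 : T % 26 ^ (k + 1) / 26 = T / 26 % 26 ^ k := by
          rw [pow_succ']; exact Nat.mod_mul_right_div_self T 26 (26 ^ k)
        rw [h1, h2]
      rw [hdig, hmodT, hcarry]
      simp

lemma pvAdd_eq (L a b : Nat) (ha : a < 26 ^ L) (hb : b < 26 ^ L) :
    pvAdd (pvDigN a L) (pvDigN b L)
      = (pvDigN ((a + b) % 26 ^ L) L, (((a + b) / 26 ^ L : Nat) : Int)) := by
  unfold pvAdd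
  have h := pvAddFold L a b 0 [] (by omega) ha hb
  simpa using h

lemma pvRevMapRange {α : Type} (f : Nat → α) (L : Nat) :
    (List.map f (List.range L)).reverse = List.map (fun j => f (L - 1 - j)) (List.range L) := by
  refine List.ext_getElem (by simp) ?_
  intro i h1 h2
  simp [List.getElem_reverse]

lemma pvRender_eq (m L : Nat) : pvRender (pvDigN m L) = pvCanon m L := by
  unfold pvRender pvDigN pvCanon
  rw [pvRevMapRange, List.map_map]
  refine List.map_congr_left (fun j _ => ?_)
  simp only [Function.comp]
  congr 1

-- the overflow test: saturation flag ∨ high part ∨ carry ↔ the true sum exceeds 26^L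
lemma pvOverIff (L t q : Nat) :
    ((26 ^ L ≤ t) ∨ 0 < q / 26 ^ L ∨ 0 < (t % 26 ^ L + q % 26 ^ L) / 26 ^ L)
      ↔ 26 ^ L ≤ t + q := by
  have hC : 0 < (26 : Nat) ^ L := Nat.pow_pos (by norm_num)
  constructor
  · rintro (h | h | h)
    · omega
    · have : 26 ^ L ≤ q := (Nat.div_pos_iff.mp h).2
      omega
    · have : 26 ^ L ≤ t % 26 ^ L + q % 26 ^ L := (Nat.div_pos_iff.mp h).2
      have h1 : t % 26 ^ L ≤ t := Nat.mod_le t _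
      have h2 : q % 26 ^ L ≤ q := Nat.mod_le q _
      omega
  · intro h
    by_cases h1 : 26 ^ L ≤ t
    · exact Or.inl h1
    by_cases h2 : 26 ^ L ≤ q
    · exact Or.inr (Or.inl (Nat.div_pos h2 hC))
    · refine Or.inr (Or.inr (Nat.div_pos ?_ hC))
      rw [Nat.mod_eq_of_lt (by omega), Nat.mod_eq_of_lt (by omega)]
      omega

-- one entry of the output, from the true start value s
def pvEntryN (L p s : Nat) : String :=
  String.mk ((if 26 ^ L ≤ s then List.replicate L 'z' else pvCanon s L)
             ++ (if 26 ^ L ≤ s + p then List.replicate L 'z' else pvCanon (s + p) L))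

-- one step of B's loop, on abstract state
lemma pvStepB_eq (L p t : Nat) (res : List String) :
    pvStepB (pvDigN (p % 26 ^ L) L) (pvDigN ((p + 1) % 26 ^ L) L)
        ((p / 26 ^ L : Nat) : Int) (((p + 1) / 26 ^ L : Nat) : Int)
        (List.replicate L 'z')
        (res, pvDigN (t % 26 ^ L) L, decide (26 ^ L ≤ t)) 0
      = (res ++ [pvEntryN L p t], pvDigN ((t + (p + 1)) % 26 ^ L) L,
         decide (26 ^ L ≤ t + (p + 1))) := by
  have hC : 0 < (26 : Nat) ^ L := Nat.pow_pos (by norm_num)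
  have htm : t % 26 ^ L < 26 ^ L := Nat.mod_lt t hC
  have hpm : p % 26 ^ L < 26 ^ L := Nat.mod_lt p hC
  have hqm : (p + 1) % 26 ^ L < 26 ^ L := Nat.mod_lt (p + 1) hC
  unfold pvStepB
  simp only [pvAdd_eq L _ _ htm hpm, pvAdd_eq L _ _ htm hqm]
  have hcur : (t % 26 ^ L + (p + 1) % 26 ^ L) % 26 ^ L = (t + (p + 1)) % 26 ^ L :=
    (Nat.add_mod t (p + 1) (26 ^ L)).symm
  have hover : ∀ q : Nat, q % 26 ^ L < 26 ^ L →
      (decide (26 ^ L ≤ t) || decide (((q / 26 ^ L : Nat) : Int) > 0)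
        || decide ((((t % 26 ^ L + q % 26 ^ L) / 26 ^ L : Nat) : Int) > 0))
      = decide (26 ^ L ≤ t + q) := by
    intro q _
    have e1 : decide (((q / 26 ^ L : Nat) : Int) > 0) = decide (0 < q / 26 ^ L) :=
      decide_eq_decide.mpr (by exact_mod_cast Iff.rfl)
    have e2 : decide ((((t % 26 ^ L + q % 26 ^ L) / 26 ^ L : Nat) : Int) > 0)
        = decide (0 < (t % 26 ^ L + q % 26 ^ L) / 26 ^ L) :=
      decide_eq_decide.mpr (by exact_mod_cast Iff.rfl)
    rw [e1, e2, Bool.or_assoc, ← Bool.decide_or, ← Bool.decide_or, decide_eq_decide]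
    exact pvOverIff L t q
  rw [hcur, hover p hpm, hover (p + 1) hqm]
  refine congrArg₂ _ ?_ rfl
  refine congrArg₂ _ rfl ?_
  refine congrArg (fun x => [x]) ?_
  unfold pvEntryN
  refine congrArg String.mk (congrArg₂ _ ?_ ?_)
  · by_cases hA : 26 ^ L ≤ t
    · simp [hA]
    · have ht : t % 26 ^ L = t := Nat.mod_eq_of_lt (by omega)
      simp [hA, ht, pvRender_eq]
  · by_cases hE : 26 ^ L ≤ t + p
    · simp [hE]
    · have h1 : ¬ 26 ^ L ≤ t := by omega
      have h2 : ¬ 26 ^ L ≤ p := by omega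
      have ht : t % 26 ^ L = t := Nat.mod_eq_of_lt (by omega)
      have hp : p % 26 ^ L = p := Nat.mod_eq_of_lt (by omega)
      have hs : (t % 26 ^ L + p % 26 ^ L) % 26 ^ L = t + p := by
        rw [ht, hp]; exact Nat.mod_eq_of_lt (by omega)
      simp [hE, hs, pvRender_eq]

lemma pvLoopB (L p : Nat) :
    ∀ (k : Nat) (res0 : List String) (s : Nat),
    (List.range k).foldl
        (pvStepB (pvDigN (p % 26 ^ L) L) (pvDigN ((p + 1) % 26 ^ L) L)
          ((p / 26 ^ L : Nat) : Int) (((p + 1) / 26 ^ L : Nat) : Int)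
          (List.replicate L 'z'))
        (res0, pvDigN (s % 26 ^ L) L, decide (26 ^ L ≤ s))
    = (res0 ++ (List.range k).map (fun i => pvEntryN L p (s + i * (p + 1))),
       pvDigN ((s + k * (p + 1)) % 26 ^ L) L, decide (26 ^ L ≤ s + k * (p + 1))) := by
  intro k
  induction k with
  | zero => intro res0 s; simp
  | succ k ih =>
      intro res0 s
      rw [List.range_succ, List.foldl_append, ih, List.foldl_cons, List.foldl_nil]
      have hstep := pvStepB_eq L p (s + k * (p + 1))
        (res0 ++ (List.range k).map (fun i => pvEntryN L p (s + i * (p + 1))))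
      -- the step ignores its Nat index, so instantiating it at 0 is general
      calc pvStepB (pvDigN (p % 26 ^ L) L) (pvDigN ((p + 1) % 26 ^ L) L)
              ((p / 26 ^ L : Nat) : Int) (((p + 1) / 26 ^ L : Nat) : Int)
              (List.replicate L 'z')
              (res0 ++ (List.range k).map (fun i => pvEntryN L p (s + i * (p + 1))),
               pvDigN ((s + k * (p + 1)) % 26 ^ L) L, decide (26 ^ L ≤ s + k * (p + 1))) k
          = pvStepB (pvDigN (p % 26 ^ L) L) (pvDigN ((p + 1) % 26 ^ L) L)
              ((p / 26 ^ L : Nat) : Int) (((p + 1) / 26 ^ L : Nat) : Int)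
              (List.replicate L 'z')
              (res0 ++ (List.range k).map (fun i => pvEntryN L p (s + i * (p + 1))),
               pvDigN ((s + k * (p + 1)) % 26 ^ L) L, decide (26 ^ L ≤ s + k * (p + 1))) 0 := rfl
        _ = _ := by
              rw [hstep, show s + k * (p + 1) + (p + 1) = s + (k + 1) * (p + 1) from by ring]
              simp

lemma pvDigitsLow_eq (L p : Nat) : pvDigitsLow (L : Int) ((p : Nat) : Int) = pvDigN p L := by
  unfold pvDigitsLow pvDigN
  rw [show ((L : Int)).toNat = L by omega]
  refine List.map_congr_left (fun j _ => ?_)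
  have h26 : ((26 : Int)) ^ j = (((26 ^ j : Nat) : Int)) := by push_cast; ring
  rw [h26, PySem.Int.floordiv_natCast, show ((26:Int)) = (((26:Nat)):Int) from rfl,
      PySem.Int.mod_natCast]

theorem divide_to_domains_spec : Claim_equal_divide_to_domains := by
  intro l n _hDom hPre
  obtain ⟨hl, hn⟩ := hPre
  unfold Spec_divide_to_domains divide_to_domains divide_to_domains_alt
  simp only []
  rw [pvLoopA]
  set L := l.toNat with hL
  have hl' : l = (L : Int) := by omega
  set C : Nat := 26 ^ L with hC
  have hCpos : 0 < C := Nat.pow_pos (by norm_num)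
  have hcount : (26 : Int) ^ L = ((C : Nat) : Int) := by rw [hC]; push_cast; ring
  set per := PySem.Int.floordiv ((26:Int) ^ L) n with hper
  have hpernn : 0 ≤ per := by
    rw [hper, PySem.Int.floordiv_eq_ediv_of_pos (by omega)]
    exact Int.ediv_nonneg (by positivity) (by omega)
  set p := per.toNat with hp
  have hpcast : per = ((p : Nat) : Int) := by omega
  -- rewrite B's precomputed data into Nat form
  have hperd : pvDigitsLow l per = pvDigN (p % C) L := by
    rw [hl', hpcast, pvDigitsLow_eq, pvDigN_mod]
  have hstepd : pvDigitsLow l (per + 1) = pvDigN ((p + 1) % C) L := by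
    have : per + 1 = (((p + 1 : Nat)) : Int) := by omega
    rw [hl', this, pvDigitsLow_eq, pvDigN_mod]
  have hperhi : PySem.Int.floordiv per ((26:Int) ^ L) = ((p / C : Nat) : Int) := by
    rw [hpcast, hcount, PySem.Int.floordiv_natCast]
  have hstephi : PySem.Int.floordiv (per + 1) ((26:Int) ^ L) = (((p + 1) / C : Nat) : Int) := by
    have : per + 1 = (((p + 1 : Nat)) : Int) := by omega
    rw [this, hcount, PySem.Int.floordiv_natCast]
  have hinit : List.replicate L (0 : Int) = pvDigN (0 % C) L := by
    rw [Nat.zero_mod, pvDigN_zero]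
  have hfalse : false = decide (C ≤ 0) := by simp [Nat.not_le.mpr hCpos]
  rw [hperd, hstepd, hperhi, hstephi, hinit, hfalse, pvLoopB L p n.toNat [] 0]
  simp only [List.nil_append]
  refine List.map_congr_left (fun i _hi => ?_)
  -- pointwise equality of the i-th entry
  set sN : Nat := 0 + i * (p + 1) with hsN
  have hsval : (0 : Int) + (i : Int) * (per + 1) = ((sN : Nat) : Int) := by
    rw [hsN, hpcast]; push_cast; ring
  have key : ∀ v : Nat, v < C → pvGsvLoop ((v : Nat) : Int) l [] = pvCanon v L := by
    intro v hv
    rw [hl', pvGsvLoop_eq L v [] hv]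
    simp
  show String.mk (pvSA ((26:Int) ^ L) per (List.replicate L 'z') l ((0:Int) + (i:Int) * (per + 1))
        ++ pvEA ((26:Int) ^ L) per (List.replicate L 'z') l ((0:Int) + (i:Int) * (per + 1)))
      = pvEntryN L p sN
  unfold pvSA pvEA pvEntryN
  rw [hsval]
  refine congrArg String.mk (congrArg₂ _ ?_ ?_)
  · by_cases h1 : C ≤ sN
    · have hge : ((sN : Nat) : Int) ≥ (26:Int) ^ L := by rw [hcount]; exact_mod_cast h1
      rw [if_pos hge, if_pos h1]
    · have hlt : sN < C := by omega
      have hge : ¬ ((sN : Nat) : Int) ≥ (26:Int) ^ L := by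
        rw [hcount]; exact_mod_cast Nat.not_le.mpr hlt
      rw [if_neg hge, if_neg h1]
      exact key sN hlt
  · have hsum : ((sN : Nat) : Int) + per = (((sN + p : Nat)) : Int) := by
      rw [hpcast]; push_cast; ring
    rw [hsum]
    by_cases h2 : C ≤ sN + p
    · have hge : (((sN + p : Nat)) : Int) ≥ (26:Int) ^ L := by rw [hcount]; exact_mod_cast h2
      rw [if_pos hge, if_pos h2]
    · have hlt : sN + p < C := by omega
      have hge : ¬ (((sN + p : Nat)) : Int) ≥ (26:Int) ^ L := by
        rw [hcount]; exact_mod_cast Nat.not_le.mpr hlt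
      rw [if_neg hge, if_neg h2]
      exact key (sN + p) hlt
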